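-- pv_equiv track=rewrite | github.com/DawoudSheraz/Google-CodeJam- | Google Code Jam 2008/Qualifier/Saving the Universe/index.py | find_optimal_engine
-- ===== SOURCE A (Python) =====
-- def find_optimal_engine(engine_query_indices_list, to_skip=''):
--
--     min_index_dict = {key:min(engine_query_indices_list[key]) for key in engine_query_indices_list.keys() if key!=to_skip}
--
--     values=list(min_index_dict.values())
--     keys=list(min_index_dict.keys())
--     if values == []:
--         return None
--     max_value = max(values)
--     max_value_index = max(idx for idx, val in enumerate(values) if val == max_value)
--
--     return keys[max_value_index]
-- ===== SOURCE B (Python) =====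
-- def find_optimal_engine(engine_query_indices_list, to_skip=''):
--     # Single fused scan: keep the best (key, min-index) pair; '>=' lets the
--     # last key among ties win, matching A's last-argmax rule.
--     best_key = None
--     best_value = None
--     for key, indices in engine_query_indices_list.items():
--         if key == to_skip:
--             continue
--         m = min(indices)
--         if best_value is None or m >= best_value:
--             best_key = key
--             best_value = m
--     return best_key
-- ===== Notes on version B (the rewrite author's own statement) =====
-- stated objective: simpler
-- what changed: Replaced the dict comprehension plus separate max pass plus last-argmax-index pass plus indexing with one fused scan that keeps (best_key, best_value) and updates on '>=' so the last tie wins.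
import Mathlib
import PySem

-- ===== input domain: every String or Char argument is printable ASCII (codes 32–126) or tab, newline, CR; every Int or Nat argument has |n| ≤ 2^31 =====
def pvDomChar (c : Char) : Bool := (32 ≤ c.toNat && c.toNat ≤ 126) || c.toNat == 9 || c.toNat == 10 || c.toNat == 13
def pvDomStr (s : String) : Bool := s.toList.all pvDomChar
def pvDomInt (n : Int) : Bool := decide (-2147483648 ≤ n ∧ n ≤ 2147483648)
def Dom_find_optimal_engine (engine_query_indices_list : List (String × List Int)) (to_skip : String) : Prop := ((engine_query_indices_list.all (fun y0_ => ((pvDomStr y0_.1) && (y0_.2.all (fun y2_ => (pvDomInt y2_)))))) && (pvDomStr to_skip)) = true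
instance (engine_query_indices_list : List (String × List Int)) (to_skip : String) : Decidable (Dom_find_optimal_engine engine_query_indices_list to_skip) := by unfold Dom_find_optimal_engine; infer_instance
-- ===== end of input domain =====

-- ===== PORT A =====
-- Port of A. The Python argument is a dict, so the association list has one entry per
-- key and the comprehension's key lookup is each entry's own value. min() on an empty
-- list raises ValueError; Pre_ excludes that, so .getD 0 is never observed.
def find_optimal_engine (engine_query_indices_list : List (String × List Int)) (to_skip : String) : Option String :=
  let min_index_dict : List (String × Int) :=
    (engine_query_indices_list.filter (fun kv => kv.1 != to_skip)).map
      (fun kv => (kv.1, (PySem.List.min? kv.2 (fun y => y)).getD 0))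
  let values : List Int := min_index_dict.map (fun kv => kv.2)
  let keys : List String := min_index_dict.map (fun kv => kv.1)
  if values = [] then none
  else
    let max_value : Int := (PySem.List.max? values (fun y => y)).getD 0
    let max_value_index : Int :=
      (PySem.List.max?
        (((PySem.List.enumerate values 0).filter (fun p => p.2 == max_value)).map (fun p => p.1))
        (fun y => y)).getD 0
    PySem.List.pyGet? keys max_value_index

-- ===== PORT B =====
-- Port of B: one fold carrying Option (best_key, best_value); '>=' keeps the last tie.
def find_optimal_engine_alt (engine_query_indices_list : List (String × List Int)) (to_skip : String) : Option String :=
  (engine_query_indices_list.foldl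
    (fun best kv =>
      if kv.1 == to_skip then best
      else
        let m : Int := (PySem.List.min? kv.2 (fun y => y)).getD 0
        match best with
        | none => some (kv.1, m)
        | some bp => if m ≥ bp.2 then some (kv.1, m) else some bp)
    none).map (fun bp => bp.1)

-- ===== PRECONDITION & SPEC =====
-- Pre_ excludes exactly the inputs where A raises ValueError: a non-skipped key with an empty index list.
def Pre_find_optimal_engine (engine_query_indices_list : List (String × List Int)) (to_skip : String) : Prop :=
  ∀ kv ∈ engine_query_indices_list, kv.1 ≠ to_skip → kv.2 ≠ []
instance (engine_query_indices_list : List (String × List Int)) (to_skip : String) : Decidable (Pre_find_optimal_engine engine_query_indices_list to_skip) := by unfold Pre_find_optimal_engine; infer_instance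
def pvWitness_find_optimal_engine : (List (String × List Int)) × String :=
  ([("a", [3, 1]), ("b", [2]), ("c", [2, 5])], "b")

def Spec_find_optimal_engine (engine_query_indices_list : List (String × List Int)) (to_skip : String) (out : Option String) : Prop := out = find_optimal_engine_alt engine_query_indices_list to_skip
instance (engine_query_indices_list : List (String × List Int)) (to_skip : String) (out : Option String) : Decidable (Spec_find_optimal_engine engine_query_indices_list to_skip out) := by unfold Spec_find_optimal_engine; infer_instance

-- ===== CLAIM (what is proved, stated in full; the proofs are below) =====
def Claim_equal_find_optimal_engine : Prop := ∀ (engine_query_indices_list : List (String × List Int)) (to_skip : String), Dom_find_optimal_engine engine_query_indices_list to_skip → Pre_find_optimal_engine engine_query_indices_list to_skip → Spec_find_optimal_engine engine_query_indices_list to_skip (find_optimal_engine engine_query_indices_list to_skip)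

-- ===== LEMMAS AND PROOFS =====

-- step function of B's fold, on the candidate (key, min) pairs
def pvH : Option (String × Int) → (String × Int) → Option (String × Int) :=
  fun best p =>
    match best with
    | none => some p
    | some bp => if p.2 ≥ bp.2 then some p else some bp

-- the (key, min) pairs both programs effectively work on
def pvCands (l : List (String × List Int)) (skip : String) : List (String × Int) :=
  (l.filter (fun kv => kv.1 != skip)).map
    (fun kv => (kv.1, (PySem.List.min? kv.2 (fun y => y)).getD 0))

-- A's last-argmax index list
def pvIdxs (c : List (String × Int)) : List Int :=
  ((PySem.List.enumerate (c.map (fun kv => kv.2)) 0).filter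
      (fun p => p.2 == (PySem.List.max? (c.map (fun kv => kv.2)) (fun y => y)).getD 0)).map
    (fun p => p.1)

theorem pvFold_eq (l : List (String × List Int)) (skip : String) (init : Option (String × Int)) :
    l.foldl
      (fun best kv =>
        if kv.1 == skip then best
        else
          let m : Int := (PySem.List.min? kv.2 (fun y => y)).getD 0
          match best with
          | none => some (kv.1, m)
          | some bp => if m ≥ bp.2 then some (kv.1, m) else some bp)
      init = (pvCands l skip).foldl pvH init := by
  induction l generalizing init with
  | nil => simp [pvCands]
  | cons kv t ih =>
    rw [List.foldl_cons]
    by_cases h : (kv.1 == skip) = true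
    · rw [if_pos h, ih]
      congr 1
      simp only [pvCands, List.filter_cons]
      rw [beq_iff_eq] at h
      simp [h]
    · rw [if_neg h, ih]
      have hc : pvCands (kv :: t) skip
          = (kv.1, (PySem.List.min? kv.2 (fun y => y)).getD 0) :: pvCands t skip := by
        simp only [pvCands, List.filter_cons]
        rw [beq_iff_eq] at h
        simp [h]
      rw [hc, List.foldl_cons]
      rfl

theorem pvMax?_unique {xs : List Int} {v w : Int}
    (h : PySem.List.max? xs (fun y => y) = some v) (hw : w ∈ xs) (hmax : ∀ y ∈ xs, y ≤ w) :
    v = w :=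
  le_antisymm (hmax v (PySem.List.max?_mem h)) (PySem.List.max?_isMax h w hw)

theorem pvMax?_exists {xs : List Int} (h : xs ≠ []) :
    ∃ v, PySem.List.max? xs (fun y => y) = some v := by
  cases hv : PySem.List.max? xs (fun y => y) with
  | none => exact absurd ((PySem.List.max?_eq_none_iff xs _).1 hv) h
  | some v => exact ⟨v, rfl⟩

theorem pvMax?_concat_lt {xs : List Int} {x : Int} (h : ∀ y ∈ xs, y < x) :
    PySem.List.max? (xs ++ [x]) (fun y => y) = some x := by
  obtain ⟨v, hv⟩ := pvMax?_exists (xs := xs ++ [x]) (by simp)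
  rw [hv]
  congr 1
  refine pvMax?_unique hv (by simp) ?_
  intro y hy
  rcases List.mem_append.1 hy with hy | hy
  · exact le_of_lt (h y hy)
  · simp at hy; omega

theorem pvMax?_concat {xs : List Int} {x v : Int}
    (h : PySem.List.max? xs (fun y => y) = some v) :
    PySem.List.max? (xs ++ [x]) (fun y => y) = some (max v x) := by
  obtain ⟨w, hw⟩ := pvMax?_exists (xs := xs ++ [x]) (by simp)
  rw [hw]
  congr 1
  refine pvMax?_unique hw ?_ ?_
  · rcases max_choice v x with hc | hc <;> rw [hc]
    · exact List.mem_append.2 (Or.inl (PySem.List.max?_mem h))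
    · simp
  · intro y hy
    rcases List.mem_append.1 hy with hy | hy
    · exact le_trans (PySem.List.max?_isMax h y hy) (le_max_left _ _)
    · simp at hy; simp [hy]

-- the loop invariant: on a nonempty candidate list the fold returns the pair
-- (last argmax key, max value), and A's index computation points at that key
theorem pvInv (c : List (String × Int)) (hc : c ≠ []) :
    ∃ k m i,
      c.foldl pvH none = some (k, m) ∧
      PySem.List.max? (c.map (fun kv => kv.2)) (fun y => y) = some m ∧
      PySem.List.max? (pvIdxs c) (fun y => y) = some i ∧
      0 ≤ i ∧ i.toNat < c.length ∧ (c.map (fun kv => kv.1))[i.toNat]? = some k := by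
  induction c using List.reverseRecOn with
  | nil => exact absurd rfl hc
  | append_singleton xs p ih =>
    rcases xs.eq_nil_or_concat'.symm with ⟨ys, q, rfl⟩ | rfl
    swap
    · -- singleton base case
      simp only [List.nil_append]
      refine ⟨p.1, p.2, 0, ?_, ?_, ?_, le_refl _, by simp, by simp⟩
      · simp [pvH]
      · simpa using PySem.List.max?_id_cons (x := p.2) (t := [])
      · rw [show pvIdxs [p] = [0] by
          simp [pvIdxs, PySem.List.enumerate_cons, PySem.List.enumerate_nil,
            PySem.List.max?_id_cons]]
        simpa using PySem.List.max?_id_cons (x := (0 : Int)) (t := [])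
    · -- append case
      obtain ⟨k', m', i', hfold, hmax, hidx, hi0, hilt, hkey⟩ := ih (by simp)
      set xs := ys ++ [q] with hxs
      have hvals : ((xs ++ [p]).map (fun kv => kv.2))
          = xs.map (fun kv => kv.2) ++ [p.2] := by simp
      have hmax' : PySem.List.max? ((xs ++ [p]).map (fun kv => kv.2)) (fun y => y)
          = some (max m' p.2) := by rw [hvals]; exact pvMax?_concat hmax
      have henum : PySem.List.enumerate ((xs ++ [p]).map (fun kv => kv.2)) 0
          = PySem.List.enumerate (xs.map (fun kv => kv.2)) 0
            ++ [((xs.length : Int), p.2)] := by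
        rw [hvals, PySem.List.enumerate_append]
        simp [PySem.List.enumerate_cons]
      have hfst_lt : ∀ y ∈ (PySem.List.enumerate (xs.map (fun kv => kv.2)) 0).map
          (fun p => p.1), y < (xs.length : Int) := by
        intro y hy
        simp only [List.mem_map] at hy
        obtain ⟨r, hr, rfl⟩ := hy
        rw [PySem.List.mem_enumerate_iff] at hr
        obtain ⟨j, hj, rfl⟩ := hr
        simp at hj ⊢
        omega
      have hfoldl' : (xs ++ [p]).foldl pvH none = pvH (some (k', m')) p := by
        rw [List.foldl_append, hfold]; rfl
      by_cases hge : p.2 ≥ m'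
      · -- new element wins (ties included): last argmax is the new index
        have hmaxv : max m' p.2 = p.2 := max_eq_right hge
        refine ⟨p.1, p.2, (xs.length : Int), ?_, ?_, ?_, by positivity, by simp, ?_⟩
        · rw [hfoldl']; simp [pvH, hge]
        · rw [hmax', hmaxv]
        · have : pvIdxs (xs ++ [p])
              = ((PySem.List.enumerate (xs.map (fun kv => kv.2)) 0).filter
                  (fun r => r.2 == p.2)).map (fun r => r.1) ++ [(xs.length : Int)] := by
            simp only [pvIdxs, hmax', hmaxv, henum, Option.getD_some, List.filter_append]
            simp
          rw [this]
          refine pvMax?_concat_lt ?_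
          intro y hy
          refine hfst_lt y ?_
          simp only [List.mem_map] at hy ⊢
          obtain ⟨r, hr, rfl⟩ := hy
          exact ⟨r, (List.mem_filter.1 hr).1, rfl⟩
        · simp
      · -- old best survives: the new value is strictly smaller
        replace hge : p.2 < m' := by omega
        have hmaxv : max m' p.2 = m' := max_eq_left (le_of_lt hge)
        refine ⟨k', m', i', ?_, ?_, ?_, hi0, by simp; omega, ?_⟩
        · rw [hfoldl']; simp [pvH, not_le.2 hge]
        · rw [hmax', hmaxv]
        · have : pvIdxs (xs ++ [p]) = pvIdxs xs := by
            simp only [pvIdxs, hmax', hmaxv, henum, Option.getD_some, List.filter_append,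
              hmax]
            have : (p.2 == m') = false := by simp; omega
            simp [this]
          rw [this]
          exact hidx
        · have hlen : i'.toNat < (xs.map (fun kv => kv.1)).length := by
            simpa using hilt
          rw [List.map_append, List.getElem?_append_left hlen]
          exact hkey

theorem pvPorts_eq (l : List (String × List Int)) (skip : String) :
    find_optimal_engine l skip = find_optimal_engine_alt l skip := by
  have hB : find_optimal_engine_alt l skip
      = ((pvCands l skip).foldl pvH none).map (fun bp => bp.1) := by
    unfold find_optimal_engine_alt
    rw [pvFold_eq]
  by_cases hc : pvCands l skip = []
  · rw [hB, hc]
    have hv := hc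
    simp only [pvCands] at hv
    unfold find_optimal_engine
    simp [hv]
  · obtain ⟨k, m, i, hfold, hmax, hidx, hi0, hilt, hkey⟩ := pvInv _ hc
    have hA : find_optimal_engine l skip = some k := by
      unfold find_optimal_engine
      have hvne : (pvCands l skip).map (fun kv => kv.2) ≠ [] := by
        simpa using hc
      simp only [show (l.filter (fun kv => kv.1 != skip)).map
          (fun kv => (kv.1, (PySem.List.min? kv.2 (fun y => y)).getD 0))
          = pvCands l skip from rfl]
      rw [if_neg hvne]
      simp only [hmax, Option.getD_some]
      rw [show ((PySem.List.enumerate ((pvCands l skip).map (fun kv => kv.2)) 0).filter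
            (fun p => p.2 == m)).map (fun p => p.1) = pvIdxs (pvCands l skip) by
          simp [pvIdxs, hmax]]
      rw [hidx, Option.getD_some, PySem.List.pyGet?_of_nonneg _ hi0]
      exact hkey
    rw [hA, hB, hfold]
    rfl

-- ===== VERDICT (by name: the statement is the Claim_ definition above) =====
theorem find_optimal_engine_spec : Claim_equal_find_optimal_engine := by
  intro l skip _ _
  unfold Spec_find_optimal_engine
  exact pvPorts_eq l skip
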